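-- pv_equiv track=rewrite | github.com/RomainDarous/PAF-MSToCM | Multiscale_tracking_for_collective_movement/mst_cm/Interpole.py | segmentation
-- ===== SOURCE A (Python) =====
-- def segmentation(liste,changementZ):
--     res=[]
--     i=0
--     acc=[]
--
--     for elt in liste:
--         if i in changementZ:
--
--             acc.append(elt)
--             res.append(acc)
--             acc=[]
--             i+=1
--         else:
--             acc.append(elt)
--             i+=1
--     res.append(acc)
--     return res
-- ===== SOURCE B (Python) =====
-- def segmentation(liste, changementZ):
--     n = len(liste)
--     cuts = sorted({i for i in changementZ if 0 <= i < n})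
--     res = []
--     start = 0
--     for b in cuts:
--         res.append(liste[start:b + 1])
--         start = b + 1
--     res.append(liste[start:])
--     return res
-- ===== Notes on version B (the rewrite author's own statement) =====
-- stated objective: alternative
-- what changed: Replaces A's element-wise accumulator pass (with a linear membership test per element) by computing the sorted in-range boundary set once and emitting each segment as a slice liste[start:b+1].
import Mathlib
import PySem

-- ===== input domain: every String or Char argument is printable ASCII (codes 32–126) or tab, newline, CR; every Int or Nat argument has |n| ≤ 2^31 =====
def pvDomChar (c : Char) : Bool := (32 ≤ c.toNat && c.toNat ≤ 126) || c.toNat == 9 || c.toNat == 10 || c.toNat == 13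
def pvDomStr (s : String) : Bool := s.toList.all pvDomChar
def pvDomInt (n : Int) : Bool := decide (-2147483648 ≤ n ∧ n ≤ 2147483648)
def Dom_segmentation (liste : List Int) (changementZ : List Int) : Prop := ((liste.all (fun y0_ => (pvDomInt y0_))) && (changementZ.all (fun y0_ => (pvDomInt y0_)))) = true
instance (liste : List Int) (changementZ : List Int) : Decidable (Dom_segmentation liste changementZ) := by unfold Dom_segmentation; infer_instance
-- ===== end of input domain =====

-- B replaces A's element-wise accumulator pass by sorting the in-range boundary set once
-- and emitting each segment as a slice (objective: alternative).

-- ===== PORT A =====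
-- forward fold over liste with state (res, i, acc); final 'res.append(acc)'
def segmentation (liste : List Int) (changementZ : List Int) : List (List Int) :=
  let s :=
    liste.foldl
      (fun (st : List (List Int) × Int × List Int) elt =>
        let res := st.1
        let i := st.2.1
        let acc := st.2.2
        if i ∈ changementZ then (res ++ [acc ++ [elt]], i + 1, ([] : List Int))
        else (res, i + 1, acc ++ [elt]))
      ([], 0, [])
  s.1 ++ [s.2.2]

-- ===== PORT B =====
-- cuts = sorted({i for i in changementZ if 0 <= i < n}); loop over cuts appending slices; final slice
def segmentation_alt (liste : List Int) (changementZ : List Int) : List (List Int) :=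
  let n : Int := liste.length
  let cuts : List Int :=
    PySem.List.sorted
      (PySem.Set.ofList (changementZ.filter (fun i => decide (0 ≤ i) && decide (i < n))))
      (fun x => x) false
  let s :=
    cuts.foldl
      (fun (st : List (List Int) × Int) b =>
        (st.1 ++ [PySem.List.slice liste (some st.2) (some (b + 1))], b + 1))
      ([], 0)
  s.1 ++ [PySem.List.slice liste (some s.2) none]

-- ===== PRECONDITION & SPEC =====
def Spec_segmentation (liste : List Int) (changementZ : List Int) (out : List (List Int)) : Prop := out = segmentation_alt liste changementZ
instance (liste : List Int) (changementZ : List Int) (out : List (List Int)) : Decidable (Spec_segmentation liste changementZ out) := by unfold Spec_segmentation; infer_instance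

-- ===== CLAIM (what is proved, stated in full; the proofs are below) =====
def Claim_equal_segmentation : Prop := ∀ (liste : List Int) (changementZ : List Int), Dom_segmentation liste changementZ → Spec_segmentation liste changementZ (segmentation liste changementZ)

-- ===== LEMMAS AND PROOFS =====

/-- Reference recursion: the segments of `xs` when the next index is `i`. -/
def segSpec (C : List Int) (i : Int) : List Int → List (List Int)
  | [] => [[]]
  | x :: xs =>
    if i ∈ C then [x] :: segSpec C (i + 1) xs
    else (segSpec C (i + 1) xs).modifyHead (x :: ·)

theorem segSpec_ne_nil (C : List Int) (i : Int) (xs : List Int) : segSpec C i xs ≠ [] := by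
  cases xs with
  | nil => simp [segSpec]
  | cons x xs =>
    simp only [segSpec]
    split
    · simp
    · cases h : segSpec C (i + 1) xs with
      | nil => exact absurd h (segSpec_ne_nil C (i + 1) xs)
      | cons a l => simp

theorem modifyHead_id (l : List (List Int)) : l.modifyHead (fun x => x) = l := by
  cases l <;> simp

/-- A's fold, from an arbitrary state, computes `segSpec` with the pending `acc` glued on. -/
theorem segA_invariant (C : List Int) (xs : List Int) :
    ∀ (res : List (List Int)) (i : Int) (acc : List Int),
      (xs.foldl
          (fun (st : List (List Int) × Int × List Int) elt =>
            if st.2.1 ∈ C then (st.1 ++ [st.2.2 ++ [elt]], st.2.1 + 1, ([] : List Int))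
            else (st.1, st.2.1 + 1, st.2.2 ++ [elt])) (res, i, acc)).1
        ++ [(xs.foldl
          (fun (st : List (List Int) × Int × List Int) elt =>
            if st.2.1 ∈ C then (st.1 ++ [st.2.2 ++ [elt]], st.2.1 + 1, ([] : List Int))
            else (st.1, st.2.1 + 1, st.2.2 ++ [elt])) (res, i, acc)).2.2]
      = res ++ (segSpec C i xs).modifyHead (acc ++ ·) := by
  induction xs with
  | nil => intro res i acc; simp [segSpec]
  | cons x xs ih =>
    intro res i acc
    simp only [List.foldl_cons, segSpec]
    by_cases h : i ∈ C
    · simp only [h, if_pos]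
      rw [ih]
      simp [modifyHead_id]
    · simp only [h, if_neg, not_false_iff]
      rw [ih]
      cases hs : segSpec C (i + 1) xs with
      | nil => exact absurd hs (segSpec_ne_nil C (i + 1) xs)
      | cons a l => simp

/-- If no index of `xs` (starting at `i`) is a boundary, there is a single segment. -/
theorem segSpec_no_cut (C : List Int) (xs : List Int) :
    ∀ (i : Int), (∀ t : Nat, t < xs.length → (i + t) ∉ C) → segSpec C i xs = [xs] := by
  induction xs with
  | nil => intro i _; simp [segSpec]
  | cons x xs ih =>
    intro i h
    have h0 : i ∉ C := by simpa using h 0 (by simp)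
    simp only [segSpec, h0, if_neg, not_false_iff]
    rw [ih (i + 1) (fun t ht => by
      have hh := h (t + 1) (by simpa using Nat.succ_lt_succ ht)
      have e : i + 1 + (t : Int) = i + ((t + 1 : Nat) : Int) := by push_cast; ring
      rw [e]; exact hh)]
    simp

/-- Splitting at the first boundary, which is `m` positions ahead. -/
theorem segSpec_first_cut (C : List Int) (m : Nat) :
    ∀ (xs : List Int) (i : Int), m < xs.length →
      (∀ t : Nat, t < m → (i + t) ∉ C) → (i + m) ∈ C →
      segSpec C i xs = xs.take (m + 1) :: segSpec C (i + m + 1) (xs.drop (m + 1)) := by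
  induction m with
  | zero =>
    intro xs i hlen _ hmem
    cases xs with
    | nil => simp at hlen
    | cons x xs =>
      have : i ∈ C := by simpa using hmem
      simp [segSpec, this]
  | succ m ih =>
    intro xs i hlen hno hmem
    cases xs with
    | nil => simp at hlen
    | cons x xs =>
      have h0 : i ∉ C := by simpa using hno 0 (by simp)
      simp only [segSpec, h0, if_neg, not_false_iff]
      rw [ih xs (i + 1) (by simpa using Nat.lt_of_succ_lt_succ hlen)
        (fun t ht => by
          have h := hno (t + 1) (by simpa using Nat.succ_lt_succ ht)
          have e : i + 1 + (t : Int) = i + ((t + 1 : Nat) : Int) := by push_cast; ring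
          rw [e]; exact h)
        (by
          have e : i + 1 + (m : Int) = i + ((m + 1 : Nat) : Int) := by push_cast; ring
          rw [e]; exact hmem)]
      simp only [List.modifyHead_cons, List.take_succ_cons, List.drop_succ_cons]
      have harith : i + 1 + (m : Int) + 1 = i + ((m + 1 : Nat) : Int) + 1 := by push_cast; ring
      rw [harith]

/-- B's slicing fold, run on any strictly increasing list of exactly the boundaries ≥ `k`,
    computes `segSpec` on the remainder of the list. -/
theorem segB_invariant (C : List Int) (liste : List Int) (cuts : List Int) :
    ∀ (k : Nat) (res : List (List Int)),
      cuts.Pairwise (· < ·) →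
      (∀ b : Int, b ∈ cuts ↔ (b ∈ C ∧ (k : Int) ≤ b ∧ b < (liste.length : Int))) →
      (cuts.foldl
          (fun (st : List (List Int) × Int) b =>
            (st.1 ++ [PySem.List.slice liste (some st.2) (some (b + 1))], b + 1))
          (res, (k : Int))).1
        ++ [PySem.List.slice liste (some ((cuts.foldl
            (fun (st : List (List Int) × Int) b =>
              (st.1 ++ [PySem.List.slice liste (some st.2) (some (b + 1))], b + 1))
            (res, (k : Int))).2)) none]
      = res ++ segSpec C k (liste.drop k) := by
  induction cuts with
  | nil =>
    intro k res _ hmem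
    simp only [List.foldl_nil]
    rw [PySem.List.slice_from_natCast]
    rw [segSpec_no_cut C (liste.drop k) k (fun t ht => by
      intro hc
      have hlt : (k : Int) + t < (liste.length : Int) := by
        rw [List.length_drop] at ht
        omega
      exact absurd ((hmem ((k : Int) + t)).2 ⟨hc, by omega, hlt⟩) (List.not_mem_nil))]
  | cons b rest ih =>
    intro k res hpw hmem
    have hb : b ∈ C ∧ (k : Int) ≤ b ∧ b < (liste.length : Int) :=
      (hmem b).1 (List.mem_cons_self)
    -- write b = k + m with m = b.toNat - k
    obtain ⟨hbC, hkb, hbn⟩ := hb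
    set m : Nat := b.toNat - k with hm
    have hbval : b = (k : Int) + m := by omega
    have hrest_pw : rest.Pairwise (· < ·) := hpw.of_cons
    have hblt : ∀ b' ∈ rest, b < b' := by
      intro b' hb'; exact (List.pairwise_cons.1 hpw).1 b' hb'
    have hrest_mem : ∀ b' : Int, b' ∈ rest ↔ (b' ∈ C ∧ ((k + m + 1 : Nat) : Int) ≤ b' ∧ b' < (liste.length : Int)) := by
      intro b'
      constructor
      · intro h
        have := (hmem b').1 (List.mem_cons_of_mem _ h)
        have := hblt b' h
        push_cast
        refine ⟨(hmem b').1 (List.mem_cons_of_mem _ h) |>.1, by omega, ((hmem b').1 (List.mem_cons_of_mem _ h)).2.2⟩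
      · intro ⟨h1, h2, h3⟩
        have : b' ∈ b :: rest := (hmem b').2 ⟨h1, by push_cast at h2 ⊢; omega, h3⟩
        cases List.mem_cons.1 this with
        | inl h => exfalso; push_cast at h2; omega
        | inr h => exact h
    simp only [List.foldl_cons]
    have hb1 : b + 1 = ((k + m + 1 : Nat) : Int) := by push_cast; omega
    rw [hb1, ih (k + m + 1) _ hrest_pw hrest_mem]
    -- now reduce the segSpec side
    have hmlen : m < (liste.drop k).length := by
      rw [List.length_drop]; omega
    rw [segSpec_first_cut C m (liste.drop k) k hmlen
      (fun t ht => by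
        intro hc
        have hmemt := (hmem ((k : Int) + t)).2 ⟨hc, by omega, by omega⟩
        cases List.mem_cons.1 hmemt with
        | inl h => omega
        | inr h =>
          have := hblt _ h
          omega)
      (by rw [← hbval]; exact hbC)]
    have hslice : PySem.List.slice liste (some ((k : Nat) : Int)) (some (((k + m + 1 : Nat) : Nat) : Int))
        = (liste.drop k).take (m + 1) := by
      rw [PySem.List.slice_natCast]
      congr 1
      omega
    rw [hslice]
    have e1 : ((k + m + 1 : Nat) : Int) = (k : Int) + m + 1 := by push_cast; ring
    have e2 : List.drop (k + m + 1) liste = List.drop (m + 1) (List.drop k liste) := by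
      rw [List.drop_drop]; congr 1
    rw [e1, e2]
    simp

-- ===== VERDICT (by name: the statement is the Claim_ definition above) =====
theorem segmentation_spec : Claim_equal_segmentation := by
  unfold Claim_equal_segmentation
  intro liste changementZ _
  unfold Spec_segmentation
  have hA : segmentation liste changementZ
      = [] ++ (segSpec changementZ 0 liste).modifyHead (([] : List Int) ++ ·) :=
    segA_invariant changementZ liste [] 0 []
  have hB : segmentation_alt liste changementZ = segSpec changementZ 0 liste := by
    unfold segmentation_alt
    have hpw : (PySem.List.sorted
        (PySem.Set.ofList (changementZ.filter (fun i => decide (0 ≤ i) && decide (i < (liste.length : Int)))))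
        (fun x => x) false).Pairwise (· < ·) := PySem.List.sorted_ofList_pairwise_lt _
    have hmem : ∀ b : Int, b ∈ (PySem.List.sorted
        (PySem.Set.ofList (changementZ.filter (fun i => decide (0 ≤ i) && decide (i < (liste.length : Int)))))
        (fun x => x) false) ↔ (b ∈ changementZ ∧ ((0 : Nat) : Int) ≤ b ∧ b < (liste.length : Int)) := by
      intro b
      rw [PySem.List.mem_sorted, PySem.Set.mem_ofList, List.mem_filter]
      simp
    have := segB_invariant changementZ liste _ 0 [] hpw hmem
    simpa using this
  rw [hA, hB]
  simp [modifyHead_id]
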